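-- pv_equiv track=rewrite | github.com/derek-dkliu/pydsa | recursions/combination.py | combinate4
-- ===== SOURCE A (Python) =====
-- from collections import deque
--
-- def combinate4(str):
--     if len(str) == 0: return ['']
--     ans = []
--     q = deque()
--     q.append(("", 0))   # push curr string and option index
--     while q:
--         (s, i) = q.popleft()
--         ans.append(s)
--         for j in range(i, len(str)):
--             q.append((s + str[j], j+1))
--     return ans
-- ===== SOURCE B (Python) =====
-- def combinate4(str):
--     n = len(str)
--     ans = []
--     def emit(k, i, prefix):
--         if k == 0:
--             ans.append(prefix)
--             return
--         for j in range(i, n - k + 1):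
--             emit(k - 1, j + 1, prefix + str[j])
--     for k in range(n + 1):
--         emit(k, 0, '')
--     return ans
-- ===== Notes on version B (the rewrite author's own statement) =====
-- stated objective: alternative
-- what changed: Replaces the BFS queue of (prefix, next-index) pairs with a length-by-length enumeration: a recursive emit(k, i, prefix) helper outputs all k-combinations in index-lexicographic order for k = 0..len(str), which coincides with the queue's level order.
import Mathlib
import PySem

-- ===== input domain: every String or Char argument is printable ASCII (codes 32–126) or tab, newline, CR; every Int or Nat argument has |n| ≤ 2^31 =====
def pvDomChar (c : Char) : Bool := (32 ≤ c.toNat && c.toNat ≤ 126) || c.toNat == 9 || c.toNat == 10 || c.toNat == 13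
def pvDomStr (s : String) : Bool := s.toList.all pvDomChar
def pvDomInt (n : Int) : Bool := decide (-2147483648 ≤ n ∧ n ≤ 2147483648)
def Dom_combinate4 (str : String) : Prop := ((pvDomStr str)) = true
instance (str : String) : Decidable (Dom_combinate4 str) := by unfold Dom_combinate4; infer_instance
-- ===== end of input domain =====

-- B enumerates the subsets length by length with a recursive combinations helper
-- instead of A's BFS queue; same output list (objective: alternative, not faster).

-- ===== PORT A =====
-- Strings are carried as char lists inside the loop and converted at the end (exact:
-- the same string values are produced).  The inner `for j in range(i, len(str))`
-- that pushes onto the queue is the list `expandA`; `cs.getD j ' '` is str[j],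
-- exact because every generated j satisfies j < cs.length.
def expandA (cs : List Char) (s : List Char) (i : Nat) : List (List Char × Nat) :=
  (List.range' i (cs.length - i)).map (fun j => (s ++ [cs.getD j ' '], j + 1))

-- termination measure for the BFS queue
def qMeas (n : Nat) (q : List (List Char × Nat)) : Nat :=
  (q.map (fun p => 2 ^ (n - p.2))).sum

-- the queued work strictly shrinks: the children of an item weigh less than the item
theorem powSum_lt (n : Nat) : ∀ (m i : Nat), m = n - i →
    ((List.range' i m).map (fun j => 2 ^ (n - (j + 1)))).sum < 2 ^ (n - i) := by
  intro m
  induction m with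
  | zero => intro i _; simp
  | succ m ih =>
    intro i h
    have hi : i < n := by omega
    have h1 : n - (i + 1) = m := by omega
    have h2 : n - i = m + 1 := by omega
    have := ih (i + 1) (by omega)
    simp only [List.range'_succ, List.map_cons, List.sum_cons, h1, h2] at *
    have hp : (2:Nat) ^ (m + 1) = 2 ^ m + 2 ^ m := by rw [pow_succ]; omega
    omega

-- the while-loop of A: pop the front, record s, push the extensions
def bfsA (cs : List Char) : List (List Char × Nat) → List (List Char)
  | [] => []
  | (s, i) :: rest => s :: bfsA cs (rest ++ expandA cs s i)
termination_by q => qMeas cs.length q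
decreasing_by
  simp only [qMeas, expandA, List.map_append, List.map_map, List.sum_append,
    List.map_cons, List.sum_cons, Function.comp_def]
  have := powSum_lt cs.length (cs.length - i) i rfl
  omega

def combinate4 (str : String) : List String :=
  let cs := str.toList
  if cs.length = 0 then [""] else (bfsA cs [([], 0)]).map String.mk

-- ===== PORT B =====
-- Source B's `emit(k, i, prefix)`: appends prefix + every k-combination of str[i:]
-- (lexicographic by index); the Lean port returns the appended list.  The loop
-- `for j in range(i, n - k + 1)` is `List.range' i (cs.length - k - i)` (exact,
-- including the empty-range cases); `cs.getD j ' '` is str[j], exact since j < n.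
def emitB (cs : List Char) : Nat → Nat → List Char → List (List Char)
  | 0, _, pre => [pre]
  | k + 1, i, pre =>
    (List.range' i (cs.length - k - i)).flatMap
      (fun j => emitB cs k (j + 1) (pre ++ [cs.getD j ' ']))

-- Source B's outer loop `for k in range(n + 1): emit(k, 0, '')`
def combinate4_alt (str : String) : List String :=
  ((List.range (str.toList.length + 1)).flatMap
    (fun k => emitB str.toList k 0 [])).map String.mk

-- ===== PRECONDITION & SPEC =====
def Spec_combinate4 (str : String) (out : List String) : Prop := out = combinate4_alt str
instance (str : String) (out : List String) : Decidable (Spec_combinate4 str out) := by unfold Spec_combinate4; infer_instance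

-- ===== CLAIM (what is proved, stated in full; the proofs are below) =====
def Claim_equal_combinate4 : Prop := ∀ (str : String), Dom_combinate4 str → Spec_combinate4 str (combinate4 str)

-- ===== LEMMAS AND PROOFS =====

-- proof-side notion: the k-combinations of a char list, in lexicographic index order
def combosB (k : Nat) (chars : List Char) : List (List Char) :=
  match k, chars with
  | 0, _ => [[]]
  | _ + 1, [] => []
  | k + 1, x :: xs => (combosB k xs).map (fun t => x :: t) ++ combosB (k + 1) xs

-- one BFS round over the whole queue
def stepA (cs : List Char) (q : List (List Char × Nat)) : List (List Char × Nat) :=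
  q.flatMap (fun p => expandA cs p.1 p.2)

theorem stepA_append (cs : List Char) (a b : List (List Char × Nat)) :
    stepA cs (a ++ b) = stepA cs a ++ stepA cs b := by
  simp [stepA]

theorem stepA_iter_append (cs : List Char) :
    ∀ (k : Nat) (a b : List (List Char × Nat)),
      (stepA cs)^[k] (a ++ b) = (stepA cs)^[k] a ++ (stepA cs)^[k] b := by
  intro k
  induction k with
  | zero => intro a b; rfl
  | succ k ih =>
    intro a b
    simp only [Function.iterate_succ_apply, stepA_append, ih]

theorem stepA_iter_map {α : Type} (cs : List Char) (k : Nat) :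
    ∀ (L : List α) (g : α → List Char × Nat),
      (stepA cs)^[k] (L.map g) = L.flatMap (fun x => (stepA cs)^[k] [g x]) := by
  intro L
  induction L with
  | nil =>
    intro g
    have : ∀ k, (stepA cs)^[k] ([] : List (List Char × Nat)) = [] := by
      intro k; induction k with
      | zero => rfl
      | succ k ih => rw [Function.iterate_succ_apply, stepA]; simpa using ih
    simp [this k]
  | cons x xs ih =>
    intro g
    have : (x :: xs).map g = [g x] ++ xs.map g := by simp
    rw [this, stepA_iter_append, ih]
    simp

theorem bfsA_rotate (cs : List Char) :
    ∀ (q1 q2 : List (List Char × Nat)),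
      bfsA cs (q1 ++ q2) = q1.map Prod.fst ++ bfsA cs (q2 ++ stepA cs q1) := by
  intro q1
  induction q1 with
  | nil => intro q2; simp [stepA]
  | cons p t ih =>
    intro q2
    obtain ⟨s, i⟩ := p
    have h1 : ((s, i) :: t) ++ q2 = (s, i) :: (t ++ q2) := by simp
    rw [h1, bfsA, List.append_assoc, ih (q2 ++ expandA cs s i)]
    simp [stepA, List.append_assoc]

theorem bfsA_round (cs : List Char) (q : List (List Char × Nat)) :
    bfsA cs q = q.map Prod.fst ++ bfsA cs (stepA cs q) := by
  have := bfsA_rotate cs q []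
  simpa using this

theorem bfsA_levels (cs : List Char) :
    ∀ (m : Nat) (q : List (List Char × Nat)), (stepA cs)^[m] q = [] →
      bfsA cs q = (List.range m).flatMap (fun k => ((stepA cs)^[k] q).map Prod.fst) := by
  intro m
  induction m with
  | zero =>
    intro q h
    simp only [Function.iterate_zero, id_eq] at h
    subst h
    rw [bfsA]
    simp
  | succ m ih =>
    intro q h
    rw [bfsA_round, ih (stepA cs q) (by rw [← Function.iterate_succ_apply]; exact h)]
    rw [List.range_succ_eq_map]
    simp only [List.flatMap_cons, List.flatMap_map, Function.iterate_zero,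
      id_eq, Nat.succ_eq_add_one, Function.iterate_succ_apply]


-- the first-element characterisation of combosB over a suffix of cs
theorem combosB_firstChoice (cs : List Char) (k : Nat) :
    ∀ (m i : Nat), m = cs.length - i →
      combosB (k + 1) (cs.drop i) =
        (List.range' i m).flatMap
          (fun j => (combosB k (cs.drop (j + 1))).map (fun t => cs.getD j ' ' :: t)) := by
  intro m
  induction m with
  | zero =>
    intro i h
    have : cs.length ≤ i := by omega
    simp [List.drop_eq_nil_of_le this, combosB]
  | succ m ih =>
    intro i h
    have hi : i < cs.length := by omega
    have hd : cs.drop i = cs[i] :: cs.drop (i + 1) := List.drop_eq_getElem_cons hi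
    rw [hd]
    show (combosB k (cs.drop (i+1))).map (fun t => cs[i] :: t) ++ combosB (k+1) (cs.drop (i+1)) = _
    rw [List.range'_succ, List.flatMap_cons, ih (i + 1) (by omega),
      List.getD_eq_getElem cs ' ' hi]

-- map fst of the k-th BFS level from a single seed = the k-combinations of the suffix
theorem levelsEq (cs : List Char) :
    ∀ (k : Nat) (s : List Char) (i : Nat),
      ((stepA cs)^[k] [(s, i)]).map Prod.fst =
        (combosB k (cs.drop i)).map (fun t => s ++ t) := by
  intro k
  induction k with
  | zero => intro s i; simp [combosB]
  | succ k ih =>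
    intro s i
    rw [Function.iterate_succ_apply]
    have hstep : stepA cs [(s, i)] = expandA cs s i := by simp [stepA]
    rw [hstep]
    unfold expandA
    rw [stepA_iter_map]
    rw [List.map_flatMap]
    rw [combosB_firstChoice cs k (cs.length - i) i rfl, List.map_flatMap]
    refine List.flatMap_congr ?_
    intro j _
    rw [ih (s ++ [cs.getD j ' ']) (j + 1)]
    simp [List.map_map, Function.comp]

theorem combosB_nil_of_lt : ∀ (cs : List Char) (k : Nat), cs.length < k → combosB k cs = [] := by
  intro cs
  induction cs with
  | nil => intro k h; match k, h with | k + 1, _ => rfl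
  | cons x xs ih =>
    intro k h
    match k, h with
    | k + 1, h =>
      show (combosB k xs).map (fun t => x :: t) ++ combosB (k + 1) xs = []
      rw [ih k (by simp at h; omega), ih (k + 1) (by simp at h; omega)]
      rfl

theorem stepA_iter_nil (cs : List Char) :
    (stepA cs)^[cs.length + 1] [(([] : List Char), 0)] = [] := by
  have h := levelsEq cs (cs.length + 1) [] 0
  rw [List.drop_zero, combosB_nil_of_lt cs (cs.length + 1) (by omega)] at h
  simpa using h

theorem bfsA_eq_levels (cs : List Char) :
    bfsA cs [(([] : List Char), 0)] =
      (List.range (cs.length + 1)).flatMap (fun k => combosB k cs) := by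
  rw [bfsA_levels cs (cs.length + 1) _ (stepA_iter_nil cs)]
  refine List.flatMap_congr ?_
  intro k _
  rw [levelsEq cs k [] 0]
  simp

-- pruned first-element characterisation: the loop bound n - k + 1 of emitB
theorem combosB_firstChoice' (cs : List Char) (k : Nat) :
    ∀ (m i : Nat), m = cs.length - k - i →
      combosB (k + 1) (cs.drop i) =
        (List.range' i m).flatMap
          (fun j => (combosB k (cs.drop (j + 1))).map (fun t => cs.getD j ' ' :: t)) := by
  intro m
  induction m with
  | zero =>
    intro i h
    have hlen : (cs.drop i).length < k + 1 := by simp [List.length_drop]; omega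
    simp [combosB_nil_of_lt _ _ hlen]
  | succ m ih =>
    intro i h
    have hi : i < cs.length := by omega
    have hd : cs.drop i = cs[i] :: cs.drop (i + 1) := List.drop_eq_getElem_cons hi
    rw [hd]
    show (combosB k (cs.drop (i+1))).map (fun t => cs[i] :: t) ++ combosB (k+1) (cs.drop (i+1)) = _
    rw [List.range'_succ, List.flatMap_cons, ih (i + 1) (by omega),
      List.getD_eq_getElem cs ' ' hi]

-- the emit helper of B produces prefix-extended combinations of the suffix
theorem emitB_eq_combosB (cs : List Char) :
    ∀ (k i : Nat) (pre : List Char),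
      emitB cs k i pre = (combosB k (cs.drop i)).map (fun t => pre ++ t) := by
  intro k
  induction k with
  | zero => intro i pre; simp [emitB, combosB]
  | succ k ih =>
    intro i pre
    show (List.range' i (cs.length - k - i)).flatMap
        (fun j => emitB cs k (j + 1) (pre ++ [cs.getD j ' '])) = _
    rw [combosB_firstChoice' cs k (cs.length - k - i) i rfl, List.map_flatMap]
    refine List.flatMap_congr ?_
    intro j _
    rw [ih (j + 1) (pre ++ [cs.getD j ' '])]
    simp [List.map_map, Function.comp]

-- ===== VERDICT (by name: the statement is the Claim_ definition above) =====
theorem combinate4_spec : Claim_equal_combinate4 := by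
  intro str _
  unfold Spec_combinate4 combinate4 combinate4_alt
  have halt : (List.range (str.toList.length + 1)).flatMap (fun k => emitB str.toList k 0 [])
      = (List.range (str.toList.length + 1)).flatMap (fun k => combosB k str.toList) := by
    refine List.flatMap_congr ?_
    intro k _
    rw [emitB_eq_combosB str.toList k 0 []]
    simp
  by_cases h : str.toList.length = 0
  · have hnil : str.toList = [] := List.eq_nil_of_length_eq_zero h
    simp [hnil, emitB]
    rfl
  · rw [if_neg h, bfsA_eq_levels, halt]
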